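-- pv_equiv track=rewrite | github.com/Gh05t-PL/dockerfile_py_gen | src/dockerfile_py_gen/rules/DL3014.py | has_yes_option
-- ===== SOURCE A (Python) =====
-- def has_yes_option(cmd):
--     args = cmd.split()
--     return (
--         any(flag in args for flag in ["-y", "--yes", "-qq", "--assume-yes"]) or
--         args.count("-q") == 2 or
--         args.count("--quiet") == 2 or
--         "-q=2" in args
--     )
-- ===== SOURCE B (Python) =====
-- def has_yes_option(cmd):
--     found = False
--     q_count = 0
--     quiet_count = 0
--     for arg in cmd.split():
--         if arg in ("-y", "--yes", "-qq", "--assume-yes", "-q=2"):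
--             found = True
--         if arg == "-q":
--             q_count += 1
--         if arg == "--quiet":
--             quiet_count += 1
--     return found or q_count == 2 or quiet_count == 2
-- ===== Notes on version B (the rewrite author's own statement) =====
-- stated objective: alternative
-- what changed: A runs several independent membership scans plus two .count passes over the split args; B makes a single pass with one boolean and two counters and decides from the tallies.
import Mathlib
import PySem

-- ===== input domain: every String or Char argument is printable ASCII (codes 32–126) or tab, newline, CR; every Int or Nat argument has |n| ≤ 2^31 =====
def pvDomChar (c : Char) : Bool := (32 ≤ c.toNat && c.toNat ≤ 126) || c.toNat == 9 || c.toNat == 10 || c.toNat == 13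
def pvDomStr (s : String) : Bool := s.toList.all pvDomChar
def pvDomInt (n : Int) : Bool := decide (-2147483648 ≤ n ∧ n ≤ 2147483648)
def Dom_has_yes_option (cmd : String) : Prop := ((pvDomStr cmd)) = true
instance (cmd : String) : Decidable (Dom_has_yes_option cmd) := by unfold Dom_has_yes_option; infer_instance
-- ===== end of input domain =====

-- B replaces A's several membership scans and two .count passes by one pass with tallies (alternative decomposition).

-- ===== PORT A =====
def has_yes_option (cmd : String) : Bool :=
  let args := PySem.Str.split₀ cmd
  (["-y", "--yes", "-qq", "--assume-yes"].any (fun flag => args.contains flag)) ||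
  PySem.List.count args "-q" == 2 ||
  PySem.List.count args "--quiet" == 2 ||
  args.contains "-q=2"

-- ===== PORT B =====
def pvStepB (st : Bool × Int × Int) (arg : String) : Bool × Int × Int :=
  let st1 : Bool × Int × Int :=
    if arg ∈ ["-y", "--yes", "-qq", "--assume-yes", "-q=2"] then (true, st.2.1, st.2.2) else st
  let st2 : Bool × Int × Int :=
    if arg == "-q" then (st1.1, st1.2.1 + 1, st1.2.2) else st1
  if arg == "--quiet" then (st2.1, st2.2.1, st2.2.2 + 1) else st2

def has_yes_option_alt (cmd : String) : Bool :=
  let st := (PySem.Str.split₀ cmd).foldl pvStepB (false, 0, 0)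
  st.1 || st.2.1 == 2 || st.2.2 == 2

-- ===== PRECONDITION & SPEC =====
def Spec_has_yes_option (cmd : String) (out : Bool) : Prop := out = has_yes_option_alt cmd
instance (cmd : String) (out : Bool) : Decidable (Spec_has_yes_option cmd out) := by unfold Spec_has_yes_option; infer_instance

-- ===== CLAIM (what is proved, stated in full; the proofs are below) =====
def Claim_equal_has_yes_option : Prop := ∀ (cmd : String), Dom_has_yes_option cmd → Spec_has_yes_option cmd (has_yes_option cmd)

-- ===== LEMMAS AND PROOFS =====
theorem pvStepB_eq (f : Bool) (q qq : Int) (x : String) :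
    pvStepB (f, q, qq) x =
      (f || decide (x ∈ ["-y", "--yes", "-qq", "--assume-yes", "-q=2"]),
       q + (if x = "-q" then 1 else 0), qq + (if x = "--quiet" then 1 else 0)) := by
  unfold pvStepB
  by_cases hx : x ∈ ["-y", "--yes", "-qq", "--assume-yes", "-q=2"] <;>
    by_cases hq : x = "-q" <;> by_cases hqq : x = "--quiet" <;> simp_all

theorem pvFoldB (l : List String) (f : Bool) (q qq : Int) :
    l.foldl pvStepB (f, q, qq) =
      (f || l.any (fun a => a ∈ ["-y", "--yes", "-qq", "--assume-yes", "-q=2"]),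
       q + (l.count "-q" : Int), qq + (l.count "--quiet" : Int)) := by
  induction l generalizing f q qq with
  | nil => simp
  | cons x xs ih =>
    rw [List.foldl_cons, pvStepB_eq, ih]
    refine Prod.ext ?_ (Prod.ext ?_ ?_) <;>
      simp [List.any_cons, List.count_cons, Bool.or_assoc] <;>
      by_cases hq : x = "-q" <;> by_cases hqq : x = "--quiet" <;>
      simp_all <;> ring

theorem has_yes_option_spec : Claim_equal_has_yes_option := by
  intro cmd _
  unfold Spec_has_yes_option has_yes_option has_yes_option_alt
  rw [pvFoldB]
  apply Bool.eq_iff_iff.mpr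
  have hc : ∀ n : Nat, ((n : Int) = 2) ↔ n = 2 := by intro n; omega
  simp only [PySem.List.count_eq, Int.zero_add, Bool.or_eq_true, List.any_eq_true,
    List.contains_eq_mem, decide_eq_true_eq, beq_iff_eq, List.mem_cons,
    List.not_mem_nil, or_false, Bool.false_or, hc]
  constructor
  · intro h
    rcases h with ((⟨fl, hfl, hmem⟩ | h) | h) | h
    · exact Or.inl (Or.inl ⟨fl, hmem, by tauto⟩)
    · exact Or.inl (Or.inr h)
    · exact Or.inr h
    · exact Or.inl (Or.inl ⟨"-q=2", h, by tauto⟩)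
  · intro h
    rcases h with (⟨a, ha, h5⟩ | h) | h
    · rcases h5 with h | h | h | h | h <;> subst h
      · exact Or.inl (Or.inl (Or.inl ⟨"-y", by tauto, ha⟩))
      · exact Or.inl (Or.inl (Or.inl ⟨"--yes", by tauto, ha⟩))
      · exact Or.inl (Or.inl (Or.inl ⟨"-qq", by tauto, ha⟩))
      · exact Or.inl (Or.inl (Or.inl ⟨"--assume-yes", by tauto, ha⟩))
      · exact Or.inr ha
    · exact Or.inl (Or.inl (Or.inr h))
    · exact Or.inl (Or.inr h)
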